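-- pv_equiv track=rewrite | github.com/vZyx/Python-notes | -DSA/06 Stack/04 Homework 2 - 3 Challenges/01_f_stack_recursive.py | f_stk
-- ===== SOURCE A (Python) =====
-- def f_stk(n):
--     if n <= 1:
--         return 5
--
--     class RecursiveCall:
--         def __init__(self, n, result = 0, is_completed = False):
--             self.n = n
--             self.result = result
--             self.is_completed = is_completed
--
--     stk = [RecursiveCall(n)]
--
--     while stk:
--         n, result, is_completed = stk[-1].n, stk[-1].result, stk[-1].is_completed
--
--         if not is_completed:     # a new recursive call
--             if n <= 1:
--                 stk.append(RecursiveCall(n, 5, True))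
--             elif n % 3 == 0:
--                 stk.append(RecursiveCall(n-1-n%3, 6, False))
--             else:
--                 stk.append(RecursiveCall(n-1-n%2, 8, False))
--         else:
--             stk.pop()
--
--             if not stk:
--                 return result
--             # Update parent caller
--             stk[-1].result += result
--             stk[-1].is_completed = True
--
--     return None
-- ===== SOURCE B (Python) =====
-- def f_stk(n):
--     if n <= 1:
--         return 5
--     q, r = divmod(n - 2, 6)
--     base = 13 if r == 0 else 19 if r == 1 else 27 if r <= 3 else 33 if r == 4 else 35
--     return 30 * q + base
-- ===== Notes on version B (the rewrite author's own statement) =====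
-- stated objective: faster
-- what changed: Replaced the explicit-stack simulation of the linear recursion (one frame per step down the chain) with an O(1) closed form exploiting that the descending walk's summed value increases by exactly 30 every 6 steps: divmod(n-2,6) plus a 6-entry base table.
import Mathlib
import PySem

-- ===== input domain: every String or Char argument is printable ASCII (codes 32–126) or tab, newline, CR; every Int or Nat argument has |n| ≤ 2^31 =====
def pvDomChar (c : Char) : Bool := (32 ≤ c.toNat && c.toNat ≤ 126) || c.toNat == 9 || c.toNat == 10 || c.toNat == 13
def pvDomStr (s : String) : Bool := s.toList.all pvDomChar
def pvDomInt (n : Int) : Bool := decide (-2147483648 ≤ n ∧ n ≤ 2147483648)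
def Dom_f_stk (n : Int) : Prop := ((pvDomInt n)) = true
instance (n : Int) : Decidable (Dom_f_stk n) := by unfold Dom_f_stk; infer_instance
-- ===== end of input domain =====

-- B replaces A's explicit-stack simulation of the linear recursion by a closed form
-- (the summed value grows by 30 every 6 steps of the descending walk); objective: faster.

-- ===== PORT A =====
-- frame = (n, result, is_completed), mirroring A's RecursiveCall; stack top is the list head.
-- Termination measure for the while loop: the top frame, if incomplete, still has to walk
-- its chain down (bounded by 3*n.toNat+4); every frame below the top only gets completed
-- and popped (2 each).
def pvFrameMu (f : Int × Int × Bool) : Nat :=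
  if f.2.2 then 1 else 3 * f.1.toNat + 4

def pvStkMu : List (Int × Int × Bool) → Nat
  | [] => 0
  | f :: rest => pvFrameMu f + 2 * rest.length

def f_stk_loop (stk : List (Int × Int × Bool)) : Int :=
  match stk with
  | [] => 0  -- unreachable: corresponds to A's `return None` after the while loop
  | (n, result, is_completed) :: rest =>
    if !is_completed then      -- a new recursive call
      if n ≤ 1 then
        f_stk_loop ((n, 5, true) :: (n, result, is_completed) :: rest)
      else if PySem.Int.mod n 3 == 0 then
        f_stk_loop ((n - 1 - PySem.Int.mod n 3, 6, false) :: (n, result, is_completed) :: rest)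
      else
        f_stk_loop ((n - 1 - PySem.Int.mod n 2, 8, false) :: (n, result, is_completed) :: rest)
    else
      -- pop; if the stack empties, return result; else update the parent caller
      match rest with
      | [] => result
      | (pn, pr, _) :: rest' => f_stk_loop ((pn, pr + result, true) :: rest')
termination_by pvStkMu stk
decreasing_by
  · simp_all [pvStkMu, pvFrameMu]
    omega
  · have hm : PySem.Int.mod n 3 = Int.emod n 3 := PySem.Int.mod_eq_emod_of_pos (by omega)
    simp_all [pvStkMu, pvFrameMu]
    omega
  · have hm : PySem.Int.mod n 2 = Int.emod n 2 := PySem.Int.mod_eq_emod_of_pos (by omega)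
    simp_all [pvStkMu, pvFrameMu]
    omega
  · simp_all [pvStkMu, pvFrameMu]

def f_stk (n : Int) : Int :=
  if n ≤ 1 then 5
  else f_stk_loop [(n, 0, false)]

-- ===== PORT B =====
def f_stk_alt (n : Int) : Int :=
  if n ≤ 1 then 5
  else
    let q := PySem.Int.floordiv (n - 2) 6
    let r := PySem.Int.mod (n - 2) 6
    let base : Int :=
      if r == 0 then 13 else if r == 1 then 19 else if r ≤ 3 then 27
      else if r == 4 then 33 else 35
    30 * q + base

-- ===== PRECONDITION & SPEC =====
def Spec_f_stk (n : Int) (out : Int) : Prop := out = f_stk_alt n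
instance (n : Int) (out : Int) : Decidable (Spec_f_stk n out) := by unfold Spec_f_stk; infer_instance

-- ===== CLAIM (what is proved, stated in full; the proofs are below) =====
def Claim_equal_f_stk : Prop := ∀ (n : Int), Dom_f_stk n → Spec_f_stk n (f_stk n)

-- ===== LEMMAS AND PROOFS =====

-- the recursive value A's stack machine computes for one frame's chain
def W (n : Int) : Int :=
  if n ≤ 1 then 5
  else if PySem.Int.mod n 3 == 0 then 6 + W (n - 1)
  else 8 + W (n - 1 - PySem.Int.mod n 2)
termination_by n.toNat
decreasing_by
  · omega
  · have hm : PySem.Int.mod n 2 = n % 2 := PySem.Int.mod_eq_emod_of_pos (by omega)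
    rcases Int.emod_two_eq n with h | h <;> rw [hm, h] <;> omega

-- running the loop on an incomplete top frame completes it with its chain value added
theorem loop_false (k : Nat) : ∀ (m r : Int), m.toNat ≤ k → ∀ rest,
    f_stk_loop ((m, r, false) :: rest) = f_stk_loop ((m, r + W m, true) :: rest) := by
  induction k with
  | zero =>
    intro m r hk rest
    have hm : m ≤ 1 := by omega
    rw [f_stk_loop.eq_def]
    simp only [hm, Bool.not_false, if_pos]
    rw [f_stk_loop.eq_def]
    simp only [Bool.not_true, Bool.false_eq_true, if_false]
    rw [W]
    simp [hm]
  | succ k ih =>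
    intro m r hk rest
    by_cases hm : m ≤ 1
    · rw [f_stk_loop.eq_def]
      simp only [hm, Bool.not_false, if_pos]
      rw [f_stk_loop.eq_def]
      simp only [Bool.not_true, Bool.false_eq_true, if_false]
      rw [W]
      simp [hm]
    · have hmod2 : PySem.Int.mod m 2 = m % 2 := PySem.Int.mod_eq_emod_of_pos (by omega)
      by_cases h3 : PySem.Int.mod m 3 = 0
      · have hb3 : (PySem.Int.mod m 3 == 0) = true := beq_iff_eq.mpr h3
        rw [f_stk_loop.eq_def]
        simp only [hm, if_false, hb3, Bool.not_false, if_pos]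
        rw [h3, sub_zero]
        rw [ih (m - 1) 6 (by omega)]
        rw [f_stk_loop.eq_def]
        simp only [Bool.not_true, Bool.false_eq_true, if_false]
        conv_rhs => rw [W]
        simp only [hm, if_false, hb3, if_true]
      · have hb3 : (PySem.Int.mod m 3 == 0) = false := by
          simpa using h3
        rw [f_stk_loop.eq_def]
        simp only [hm, if_false, hb3, Bool.false_eq_true, Bool.not_false, if_pos]
        rw [ih (m - 1 - PySem.Int.mod m 2) 8
          (by rcases Int.emod_two_eq m with h | h <;> rw [hmod2, h] <;> omega)]
        rw [f_stk_loop.eq_def]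
        simp only [Bool.not_true, Bool.false_eq_true, if_false]
        conv_rhs => rw [W]
        simp only [hm, if_false, hb3, Bool.false_eq_true]

theorem f_stk_eq_W (n : Int) : f_stk n = W n := by
  by_cases hn : n ≤ 1
  · rw [f_stk, W]; simp [hn]
  · rw [f_stk, if_neg hn, loop_false n.toNat n 0 (le_refl _) []]
    rw [f_stk_loop.eq_def]
    simp

-- B's closed form satisfies the % 3 == 0 step of the recursion
theorem alt_rec1 (n : Int) (h2 : 2 ≤ n) (h3 : n % 3 = 0) :
    f_stk_alt n = 6 + f_stk_alt (n - 1) := by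
  have hfd : ∀ a : Int, PySem.Int.floordiv a 6 = a / 6 := fun a =>
    PySem.Int.floordiv_eq_ediv_of_pos (by omega)
  have hmd : ∀ a : Int, PySem.Int.mod a 6 = a % 6 := fun a =>
    PySem.Int.mod_eq_emod_of_pos (by omega)
  obtain ⟨q, c, hc0, hc5, hn⟩ : ∃ q c, 0 ≤ c ∧ c < 6 ∧ n = 6 * q + c :=
    ⟨n / 6, n % 6, by omega, by omega, by omega⟩
  subst hn
  interval_cases c
  · -- n = 6q, q ≥ 1
    have e1 : (6 * q + 0 - 2) % 6 = 4 := by omega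
    have e2 : (6 * q + 0 - 2) / 6 = q - 1 := by omega
    have e3 : (6 * q + 0 - 1 - 2) % 6 = 3 := by omega
    have e4 : (6 * q + 0 - 1 - 2) / 6 = q - 1 := by omega
    rw [f_stk_alt, f_stk_alt, if_neg (by omega), if_neg (by omega)]
    simp only [hfd, hmd, e1, e2, e3, e4]
    norm_num
    omega
  · omega
  · omega
  · -- n = 6q + 3
    have e1 : (6 * q + 3 - 2) % 6 = 1 := by omega
    have e2 : (6 * q + 3 - 2) / 6 = q := by omega
    have e3 : (6 * q + 3 - 1 - 2) % 6 = 0 := by omega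
    have e4 : (6 * q + 3 - 1 - 2) / 6 = q := by omega
    rw [f_stk_alt, f_stk_alt, if_neg (by omega), if_neg (by omega)]
    simp only [hfd, hmd, e1, e2, e3, e4]
    norm_num
    omega
  · omega
  · omega

-- B's closed form satisfies the % 3 ≠ 0 step of the recursion
theorem alt_rec2 (n : Int) (h2 : 2 ≤ n) (h3 : ¬ n % 3 = 0) :
    f_stk_alt n = 8 + f_stk_alt (n - 1 - n % 2) := by
  have hfd : ∀ a : Int, PySem.Int.floordiv a 6 = a / 6 := fun a =>
    PySem.Int.floordiv_eq_ediv_of_pos (by omega)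
  have hmd : ∀ a : Int, PySem.Int.mod a 6 = a % 6 := fun a =>
    PySem.Int.mod_eq_emod_of_pos (by omega)
  obtain ⟨q, c, hc0, hc5, hn⟩ : ∃ q c, 0 ≤ c ∧ c < 6 ∧ n = 6 * q + c :=
    ⟨n / 6, n % 6, by omega, by omega, by omega⟩
  subst hn
  interval_cases c
  · omega
  · -- n = 6q + 1, odd, q ≥ 1; n - 2 = 6(q-1) + 5
    have em : (6 * q + 1) % 2 = 1 := by omega
    have e1 : (6 * q + 1 - 2) % 6 = 5 := by omega
    have e2 : (6 * q + 1 - 2) / 6 = q - 1 := by omega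
    have e3 : (6 * q + 1 - 1 - 1 - 2) % 6 = 3 := by omega
    have e4 : (6 * q + 1 - 1 - 1 - 2) / 6 = q - 1 := by omega
    rw [em, f_stk_alt, f_stk_alt, if_neg (by omega), if_neg (by omega)]
    simp only [hfd, hmd, e1, e2, e3, e4]
    norm_num
    omega
  · -- n = 6q + 2, even; n - 1 = 6q + 1; if q = 0 the child is the base case
    have em : (6 * q + 2) % 2 = 0 := by omega
    rw [em]
    by_cases hq : q = 0
    · subst hq
      norm_num [f_stk_alt, hfd, hmd]
    · have e1 : (6 * q + 2 - 2) % 6 = 0 := by omega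
      have e2 : (6 * q + 2 - 2) / 6 = q := by omega
      have e3 : (6 * q + 2 - 1 - 0 - 2) % 6 = 5 := by omega
      have e4 : (6 * q + 2 - 1 - 0 - 2) / 6 = q - 1 := by omega
      rw [f_stk_alt, f_stk_alt, if_neg (by omega), if_neg (by omega)]
      simp only [hfd, hmd, e1, e2, e3, e4]
      norm_num
      omega
  · omega
  · -- n = 6q + 4, even; child is 6q + 3
    have em : (6 * q + 4) % 2 = 0 := by omega
    have e1 : (6 * q + 4 - 2) % 6 = 2 := by omega
    have e2 : (6 * q + 4 - 2) / 6 = q := by omega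
    have e3 : (6 * q + 4 - 1 - 0 - 2) % 6 = 1 := by omega
    have e4 : (6 * q + 4 - 1 - 0 - 2) / 6 = q := by omega
    rw [em, f_stk_alt, f_stk_alt, if_neg (by omega), if_neg (by omega)]
    simp only [hfd, hmd, e1, e2, e3, e4]
    norm_num
    omega
  · -- n = 6q + 5, odd; child is 6q + 3
    have em : (6 * q + 5) % 2 = 1 := by omega
    have e1 : (6 * q + 5 - 2) % 6 = 3 := by omega
    have e2 : (6 * q + 5 - 2) / 6 = q := by omega
    have e3 : (6 * q + 5 - 1 - 1 - 2) % 6 = 1 := by omega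
    have e4 : (6 * q + 5 - 1 - 1 - 2) / 6 = q := by omega
    rw [em, f_stk_alt, f_stk_alt, if_neg (by omega), if_neg (by omega)]
    simp only [hfd, hmd, e1, e2, e3, e4]
    norm_num
    omega

theorem W_eq_alt (k : Nat) : ∀ (n : Int), n.toNat ≤ k → W n = f_stk_alt n := by
  induction k with
  | zero =>
    intro n hk
    have hn : n ≤ 1 := by omega
    rw [W, f_stk_alt]; simp [hn]
  | succ k ih =>
    intro n hk
    by_cases hn : n ≤ 1
    · rw [W, f_stk_alt]; simp [hn]
    · have hmod3 : PySem.Int.mod n 3 = n % 3 := PySem.Int.mod_eq_emod_of_pos (by omega)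
      have hmod2 : PySem.Int.mod n 2 = n % 2 := PySem.Int.mod_eq_emod_of_pos (by omega)
      by_cases h3 : n % 3 = 0
      · rw [W]
        rw [if_neg hn, if_pos (by rw [hmod3]; exact beq_iff_eq.mpr h3)]
        rw [ih (n - 1) (by omega)]
        rw [alt_rec1 n (by omega) h3]
      · rw [W]
        rw [if_neg hn, if_neg (by rw [hmod3]; exact fun h => h3 (beq_iff_eq.mp h)), hmod2]
        rw [ih (n - 1 - n % 2)
          (by rcases Int.emod_two_eq n with h | h <;> rw [h] <;> omega)]
        rw [alt_rec2 n (by omega) h3]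

-- ===== VERDICT (by name: the statement is the Claim_ definition above) =====
theorem f_stk_spec : Claim_equal_f_stk := by
  intro n _
  unfold Spec_f_stk
  rw [f_stk_eq_W, W_eq_alt n.toNat n (le_refl _)]
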